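-- pv_equiv track=rewrite | github.com/MrBrantCode/unitest_baseline | mut_generate/mist_train_cf/cf_78811/solution.py | move_two_balls
-- ===== SOURCE A (Python) =====
-- def move_two_balls(arr):
--     if not arr:
--         return True
--
--     n = len(arr)
--     inversions = 0
--     small_elements = 0
--
--     for i in range(n):
--         for j in range(i + 1, n):
--             if arr[i] > arr[j]:
--                 inversions += 1
--
--             if arr[0] > arr[j]:
--                 small_elements += 1
--
--     if small_elements % 2 == 0 and (inversions == 0 or inversions == 1 or inversions == 2):
--         return True
--     else:
--         return False
-- ===== SOURCE B (Python) =====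
-- def move_two_balls(arr):
--     # Merge-sort inversion count (O(n log n)) plus one linear pass for the
--     # index-weighted "small elements" parity that A accumulates in its
--     # quadratic double loop.
--     if not arr:
--         return True
--
--     def sort_count(a):
--         if len(a) <= 1:
--             return 0, a
--         m = len(a) // 2
--         il, left = sort_count(a[:m])
--         ir, right = sort_count(a[m:])
--         inv = il + ir
--         merged = []
--         i = j = 0
--         while i < len(left) and j < len(right):
--             if left[i] <= right[j]:
--                 merged.append(left[i])
--                 i += 1
--             else:
--                 inv += len(left) - i
--                 merged.append(right[j])
--                 j += 1
--         merged.extend(left[i:])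
--         merged.extend(right[j:])
--         return inv, merged
--
--     inversions, _ = sort_count(arr)
--     small = sum(j for j in range(1, len(arr)) if arr[0] > arr[j])
--     return small % 2 == 0 and inversions <= 2
-- ===== Notes on version B (the rewrite author's own statement) =====
-- stated objective: faster
-- what changed: Replaces A's O(n^2) double loop with a merge-sort inversion count and a single linear pass computing the index-weighted small-element parity in closed form.
import Mathlib
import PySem

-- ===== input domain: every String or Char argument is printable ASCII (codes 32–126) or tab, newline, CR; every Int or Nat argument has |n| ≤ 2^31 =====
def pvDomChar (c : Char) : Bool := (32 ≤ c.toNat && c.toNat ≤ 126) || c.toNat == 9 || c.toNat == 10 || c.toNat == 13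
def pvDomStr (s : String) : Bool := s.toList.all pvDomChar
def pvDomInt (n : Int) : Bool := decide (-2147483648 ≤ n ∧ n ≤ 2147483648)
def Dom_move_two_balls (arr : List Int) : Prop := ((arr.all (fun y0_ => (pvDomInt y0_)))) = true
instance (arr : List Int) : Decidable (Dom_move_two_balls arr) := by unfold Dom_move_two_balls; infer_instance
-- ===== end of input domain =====

-- B replaces A's O(n^2) double loop by a merge-sort inversion count plus one
-- linear pass for the (index-weighted) small-element parity; same return value.

-- ===== PORT A =====
-- inner loop body: 'if arr[i] > arr[j]: inversions += 1 ; if arr[0] > arr[j]: small_elements += 1'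
def aInner (arr : List Int) (i : Int) (st : Int × Int) (j : Int) : Int × Int :=
  (if PySem.List.pyGetD arr i 0 > PySem.List.pyGetD arr j 0 then st.1 + 1 else st.1,
   if PySem.List.pyGetD arr 0 0 > PySem.List.pyGetD arr j 0 then st.2 + 1 else st.2)

-- 'for j in range(i + 1, n): …'
def aOuter (arr : List Int) (st : Int × Int) (i : Int) : Int × Int :=
  (PySem.List.pyRange (i + 1) (arr.length : Int) 1).foldl (aInner arr i) st

def move_two_balls (arr : List Int) : Bool :=
  if arr = [] then true
  else
    let p := (PySem.List.pyRange 0 (arr.length : Int) 1).foldl (aOuter arr) (0, 0)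
    if p.2 % 2 == 0 && (p.1 == 0 || p.1 == 1 || p.1 == 2) then true else false

-- ===== PORT B =====
-- the merge step of sort_count (Python's while loop + extends, as structural recursion)
def sortCountMerge : List Int → List Int → Int × List Int
  | [], r => (0, r)
  | x :: l, [] => (0, x :: l)
  | x :: l, y :: r =>
    if x ≤ y then
      let p := sortCountMerge l (y :: r)
      (p.1, x :: p.2)
    else
      let p := sortCountMerge (x :: l) r
      (p.1 + ((x :: l).length : Int), y :: p.2)
termination_by l r => l.length + r.length

-- Python's sort_count: split at the midpoint, recurse, merge counting cross inversions
def sortCount (a : List Int) : Int × List Int :=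
  if h : a.length ≤ 1 then (0, a)
  else
    let m := a.length / 2
    let p1 := sortCount (a.take m)
    let p2 := sortCount (a.drop m)
    let pm := sortCountMerge p1.2 p2.2
    (p1.1 + p2.1 + pm.1, pm.2)
termination_by a.length
decreasing_by
  · simpa [List.length_take] using by omega
  · simp only [List.length_drop]; omega

-- 'sum(j for j in range(1, len(arr)) if arr[0] > arr[j])'
def bStep (arr : List Int) (s : Int) (j : Int) : Int :=
  if PySem.List.pyGetD arr 0 0 > PySem.List.pyGetD arr j 0 then s + j else s

def move_two_balls_alt (arr : List Int) : Bool :=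
  if arr = [] then true
  else
    let inversions := (sortCount arr).1
    let small := (PySem.List.pyRange 1 (arr.length : Int) 1).foldl (bStep arr) 0
    small % 2 == 0 && decide (inversions ≤ 2)

-- ===== PRECONDITION & SPEC =====
def Spec_move_two_balls (arr : List Int) (out : Bool) : Prop := out = move_two_balls_alt arr
instance (arr : List Int) (out : Bool) : Decidable (Spec_move_two_balls arr out) := by unfold Spec_move_two_balls; infer_instance

-- ===== CLAIM (what is proved, stated in full; the proofs are below) =====
def Claim_equal_move_two_balls : Prop := ∀ (arr : List Int), Dom_move_two_balls arr → Spec_move_two_balls arr (move_two_balls arr)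

-- ===== LEMMAS AND PROOFS =====

-- number of elements of l smaller than x, as an Int
def cntLt (x : Int) (l : List Int) : Int := (l.countP (fun y => decide (y < x)) : Int)

-- number of inversions of l
def inv2 : List Int → Int
  | [] => 0
  | x :: xs => cntLt x xs + inv2 xs

-- A's small_elements: each proper suffix contributes its count of elements < x0
def sumSuf (x0 : Int) : List Int → Int
  | [] => 0
  | _ :: ys => cntLt x0 ys + sumSuf x0 ys

-- B's small: index-weighted count, weight k for the head
def wsum (x0 k : Int) : List Int → Int
  | [] => 0
  | y :: ys => (if y < x0 then k else 0) + wsum x0 (k + 1) ys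

-- cross inversions between two lists
def cross (l r : List Int) : Int := (l.map (fun x => cntLt x r)).sum

lemma cntLt_nonneg (x : Int) (l : List Int) : 0 ≤ cntLt x l := by
  simp [cntLt]

lemma cntLt_cons (x a : Int) (l : List Int) :
    cntLt x (a :: l) = (if a < x then 1 else 0) + cntLt x l := by
  by_cases h : a < x <;> simp [cntLt, h] <;> omega

lemma cntLt_append (x : Int) (l r : List Int) :
    cntLt x (l ++ r) = cntLt x l + cntLt x r := by
  simp [cntLt, List.countP_append]

lemma cntLt_perm (x : Int) {l r : List Int} (h : l.Perm r) : cntLt x l = cntLt x r := by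
  simp [cntLt, h.countP_eq]

lemma inv2_nonneg (l : List Int) : 0 ≤ inv2 l := by
  induction l with
  | nil => simp [inv2]
  | cons x xs ih => have := cntLt_nonneg x xs; simp [inv2]; omega

lemma inv2_append (l r : List Int) :
    inv2 (l ++ r) = inv2 l + inv2 r + cross l r := by
  induction l with
  | nil => simp [inv2, cross]
  | cons x xs ih =>
    simp [inv2, cross, cntLt_append] at *
    rw [ih]; ring

lemma cross_perm_left {l l' : List Int} (r : List Int) (h : l.Perm l') :
    cross l r = cross l' r := by
  exact (h.map _).sum_eq

lemma cross_perm_right (l : List Int) {r r' : List Int} (h : r.Perm r') :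
    cross l r = cross l r' := by
  have hf : (fun x => cntLt x r) = fun x => cntLt x r' := funext fun x => cntLt_perm x h
  rw [cross, cross, hf]

lemma cross_cons_left (x : Int) (l r : List Int) :
    cross (x :: l) r = cntLt x r + cross l r := by
  simp [cross]

lemma cross_nil_right (l : List Int) : cross l [] = 0 := by
  simp [cross, cntLt]

-- the merge step: on sorted inputs it returns the cross-inversion count and a sorted merge
lemma sortCountMerge_spec : ∀ (l r : List Int),
    l.Pairwise (· ≤ ·) → r.Pairwise (· ≤ ·) →
    (sortCountMerge l r).1 = cross l r ∧
    (sortCountMerge l r).2.Perm (l ++ r) ∧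
    (sortCountMerge l r).2.Pairwise (· ≤ ·) := by
  intro l r
  induction l, r using sortCountMerge.induct with
  | case1 r =>
    intro _ hr
    have e : sortCountMerge [] r = (0, r) := by simp [sortCountMerge]
    rw [e]
    exact ⟨by simp [cross], by simp, hr⟩
  | case2 x l =>
    intro hl _
    have e : sortCountMerge (x :: l) [] = (0, x :: l) := by simp [sortCountMerge]
    rw [e]
    exact ⟨by simp [cross_nil_right], by simp, hl⟩
  | case3 x l y r hxy ih =>
    intro hl hr
    obtain ⟨hc, hp, hs⟩ := ih (List.Pairwise.of_cons hl) hr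
    have hxl : ∀ z ∈ l, x ≤ z := fun z hz => (List.pairwise_cons.mp hl).1 z hz
    have hyr : ∀ z ∈ r, y ≤ z := fun z hz => (List.pairwise_cons.mp hr).1 z hz
    have hcnt : cntLt x (y :: r) = 0 := by
      unfold cntLt
      rw [List.countP_eq_zero.mpr]
      · simp
      · intro z hz
        simp only [decide_eq_true_eq, not_lt]
        rcases List.mem_cons.mp hz with rfl | hz
        · exact hxy
        · exact le_trans hxy (hyr z hz)
    refine ⟨?_, ?_, ?_⟩
    · simp only [sortCountMerge, if_pos hxy]
      rw [cross_cons_left, hcnt, hc]; ring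
    · simp only [sortCountMerge, if_pos hxy]
      simpa using hp.cons x
    · simp only [sortCountMerge, if_pos hxy]
      refine List.pairwise_cons.mpr ⟨?_, hs⟩
      intro z hz
      have hz' : z ∈ l ++ y :: r := hp.mem_iff.mp hz
      rcases List.mem_append.mp hz' with hz1 | hz2
      · exact hxl z hz1
      · rcases List.mem_cons.mp hz2 with rfl | hz2
        · exact hxy
        · exact le_trans hxy (hyr z hz2)
  | case4 x l y r hxy ih =>
    intro hl hr
    have hyx : y < x := by omega
    obtain ⟨hc, hp, hs⟩ := ih hl (List.Pairwise.of_cons hr)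
    have hxl : ∀ z ∈ l, x ≤ z := fun z hz => (List.pairwise_cons.mp hl).1 z hz
    have hyr : ∀ z ∈ r, y ≤ z := fun z hz => (List.pairwise_cons.mp hr).1 z hz
    have hcross : cross (x :: l) (y :: r) = ((x :: l).length : Int) + cross (x :: l) r := by
      rw [cross_cons_left, cross_cons_left, cntLt_cons]
      rw [if_pos hyx]
      have : ∀ (ll : List Int), (∀ z ∈ ll, y < z) →
          cross ll (y :: r) = (ll.length : Int) + cross ll r := by
        intro ll
        induction ll with
        | nil => intro _; simp [cross, cntLt]
        | cons a t iht =>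
          intro hall
          rw [cross_cons_left, cross_cons_left, cntLt_cons, if_pos (hall a (by simp))]
          rw [iht (fun z hz => hall z (by simp [hz]))]
          push_cast [List.length_cons]; ring
      rw [this l (fun z hz => lt_of_lt_of_le hyx (hxl z hz))]
      push_cast [List.length_cons]; ring
    refine ⟨?_, ?_, ?_⟩
    · simp only [sortCountMerge, if_neg hxy]
      rw [hcross, hc]; ring
    · simp only [sortCountMerge, if_neg hxy]
      have h1 : (y :: (sortCountMerge (x :: l) r).2).Perm (y :: ((x :: l) ++ r)) := hp.cons y
      have h2 : (y :: ((x :: l) ++ r)).Perm ((x :: l) ++ y :: r) := (List.perm_middle).symm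
      exact h1.trans h2
    · simp only [sortCountMerge, if_neg hxy]
      refine List.pairwise_cons.mpr ⟨?_, hs⟩
      intro z hz
      have hz' : z ∈ (x :: l) ++ r := hp.mem_iff.mp hz
      rcases List.mem_append.mp hz' with hz1 | hz2
      · rcases List.mem_cons.mp hz1 with rfl | hz1
        · omega
        · have := hxl z hz1; omega
      · exact hyr z hz2

lemma inv2_short (a : List Int) (h : a.length ≤ 1) : inv2 a = 0 := by
  match a with
  | [] => simp [inv2]
  | [x] => simp [inv2, cntLt]
  | x :: y :: t => simp at h

-- the full sort_count: count = number of inversions, list = sorted permutation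
lemma sortCount_spec : ∀ (a : List Int),
    (sortCount a).1 = inv2 a ∧ (sortCount a).2.Perm a ∧ (sortCount a).2.Pairwise (· ≤ ·) := by
  intro a
  induction a using sortCount.induct with
  | case1 a h =>
    rw [sortCount, dif_pos h]
    refine ⟨(inv2_short a h).symm, List.Perm.refl a, ?_⟩
    match a, h with
    | [], _ => simp
    | [x], _ => simp
  | case2 a h m ih1 ih2 =>
    rw [sortCount, dif_neg h]
    dsimp only
    obtain ⟨hc1, hp1, hs1⟩ := ih1
    obtain ⟨hc2, hp2, hs2⟩ := ih2
    obtain ⟨hmc, hmp, hms⟩ := sortCountMerge_spec _ _ hs1 hs2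
    refine ⟨?_, ?_, hms⟩
    · have hsplit : inv2 a = inv2 (a.take m) + inv2 (a.drop m)
          + cross (a.take m) (a.drop m) := by
        conv_lhs => rw [← List.take_append_drop m a]
        exact inv2_append _ _
      rw [hmc, hc1, hc2, hsplit, cross_perm_left _ hp1, cross_perm_right _ hp2]
    · have h3 : (a.take m ++ a.drop m).Perm a := by rw [List.take_append_drop]
      exact (hmp.trans (hp1.append hp2)).trans h3

-- A's inner loop over range(i+1, n) adds the suffix counts
lemma inner_fold (arr : List Int) (i : Int) :
    ∀ (j : Nat) (st : Int × Int), j ≤ arr.length →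
    (PySem.List.pyRange (j : Int) (arr.length : Int) 1).foldl (aInner arr i) st
      = (st.1 + cntLt (PySem.List.pyGetD arr i 0) (arr.drop j),
         st.2 + cntLt (PySem.List.pyGetD arr 0 0) (arr.drop j)) := by
  intro j st hj
  induction hd : arr.length - j generalizing j st with
  | zero =>
    have hge : (arr.length : Int) ≤ (j : Int) := by exact_mod_cast (by omega : arr.length ≤ j)
    rw [PySem.List.pyRange_one_eq_nil hge]
    have hdrop : arr.drop j = [] := List.drop_eq_nil_of_le (by omega)
    simp [hdrop, cntLt]
  | succ t ih =>
    have hjlt : j < arr.length := by omega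
    rw [PySem.List.pyRange_one_cons (by exact_mod_cast hjlt)]
    simp only [List.foldl_cons]
    have hcast : ((j : Int) + 1) = ((j + 1 : Nat) : Int) := by push_cast; ring
    rw [hcast, ih (j + 1) _ (by omega) (by omega)]
    have hdrop : arr.drop j = arr[j] :: arr.drop (j + 1) := List.drop_eq_getElem_cons hjlt
    have hget : PySem.List.pyGetD arr (j : Int) 0 = arr[j] := by
      rw [PySem.List.pyGetD_natCast]
      exact List.getD_eq_getElem arr 0 hjlt
    rw [hdrop]
    simp only [aInner, hget, cntLt_cons, Prod.mk.injEq, gt_iff_lt]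
    constructor <;> split_ifs <;> ring

-- A's outer loop accumulates inv2 and sumSuf over the suffixes
lemma outer_fold (arr : List Int) :
    ∀ (i : Nat) (st : Int × Int), i ≤ arr.length →
    (PySem.List.pyRange (i : Int) (arr.length : Int) 1).foldl (aOuter arr) st
      = (st.1 + inv2 (arr.drop i), st.2 + sumSuf (PySem.List.pyGetD arr 0 0) (arr.drop i)) := by
  intro i st hi
  induction hd : arr.length - i generalizing i st with
  | zero =>
    have hge : (arr.length : Int) ≤ (i : Int) := by exact_mod_cast (by omega : arr.length ≤ i)
    rw [PySem.List.pyRange_one_eq_nil hge]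
    have hdrop : arr.drop i = [] := List.drop_eq_nil_of_le (by omega)
    simp [hdrop, inv2, sumSuf]
  | succ t ih =>
    have hilt : i < arr.length := by omega
    rw [PySem.List.pyRange_one_cons (by exact_mod_cast hilt)]
    simp only [List.foldl_cons]
    have hcast : ((i : Int) + 1) = ((i + 1 : Nat) : Int) := by push_cast; ring
    have hstep : aOuter arr st (i : Int)
        = (st.1 + cntLt (PySem.List.pyGetD arr (i : Int) 0) (arr.drop (i + 1)),
           st.2 + cntLt (PySem.List.pyGetD arr 0 0) (arr.drop (i + 1))) := by
      rw [aOuter, hcast]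
      exact inner_fold arr (i : Int) (i + 1) st (by omega)
    rw [hcast, ih (i + 1) _ (by omega) (by omega), hstep]
    have hdrop : arr.drop i = arr[i] :: arr.drop (i + 1) := List.drop_eq_getElem_cons hilt
    have hget : PySem.List.pyGetD arr (i : Int) 0 = arr[i] := by
      rw [PySem.List.pyGetD_natCast]
      exact List.getD_eq_getElem arr 0 hilt
    rw [hdrop, hget]
    simp only [inv2, sumSuf, Prod.mk.injEq]
    constructor <;> ring

-- B's single pass over range(1, n) computes the weighted sum
lemma b_fold (arr : List Int) :
    ∀ (j : Nat) (s : Int), j ≤ arr.length →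
    (PySem.List.pyRange (j : Int) (arr.length : Int) 1).foldl (bStep arr) s
      = s + wsum (PySem.List.pyGetD arr 0 0) (j : Int) (arr.drop j) := by
  intro j s hj
  induction hd : arr.length - j generalizing j s with
  | zero =>
    have hge : (arr.length : Int) ≤ (j : Int) := by exact_mod_cast (by omega : arr.length ≤ j)
    rw [PySem.List.pyRange_one_eq_nil hge]
    have hdrop : arr.drop j = [] := List.drop_eq_nil_of_le (by omega)
    simp [hdrop, wsum]
  | succ t ih =>
    have hjlt : j < arr.length := by omega
    rw [PySem.List.pyRange_one_cons (by exact_mod_cast hjlt)]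
    simp only [List.foldl_cons]
    have hcast : ((j : Int) + 1) = ((j + 1 : Nat) : Int) := by push_cast; ring
    rw [hcast, ih (j + 1) _ (by omega) (by omega)]
    have hdrop : arr.drop j = arr[j] :: arr.drop (j + 1) := List.drop_eq_getElem_cons hjlt
    have hget : PySem.List.pyGetD arr (j : Int) 0 = arr[j] := by
      rw [PySem.List.pyGetD_natCast]
      exact List.getD_eq_getElem arr 0 hjlt
    rw [hdrop]
    simp only [bStep, wsum, hget, ← hcast]
    split_ifs <;> ring

lemma wsum_shift (x0 : Int) : ∀ (l : List Int) (k : Int),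
    wsum x0 k l = wsum x0 0 l + k * cntLt x0 l := by
  intro l
  induction l with
  | nil => intro k; simp [wsum, cntLt]
  | cons y ys ih =>
    intro k
    rw [wsum, wsum, ih (k + 1), cntLt_cons]
    simp only [zero_add]
    rw [ih 1]
    split_ifs <;> ring

lemma sumSuf_eq_wsum0 (x0 : Int) : ∀ (l : List Int), sumSuf x0 l = wsum x0 0 l := by
  intro l
  induction l with
  | nil => simp [sumSuf, wsum]
  | cons y ys ih =>
    rw [sumSuf, wsum, ih]
    simp only [zero_add]
    rw [wsum_shift x0 ys 1]
    split_ifs <;> ring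

lemma sumSuf_eq_wsum1 (x0 a : Int) (rest : List Int) :
    sumSuf x0 (a :: rest) = wsum x0 1 rest := by
  rw [sumSuf, sumSuf_eq_wsum0, wsum_shift x0 rest 1]
  ring

lemma bool_final (i s : Int) (h : 0 ≤ i) :
    (if s % 2 == 0 && (i == 0 || i == 1 || i == 2) then true else false)
      = (s % 2 == 0 && decide (i ≤ 2)) := by
  have he : (i == 0 || i == 1 || i == 2) = decide (i ≤ 2) := by
    by_cases hi : i ≤ 2
    · have : i = 0 ∨ i = 1 ∨ i = 2 := by omega
      rcases this with rfl | rfl | rfl <;> simp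
    · have h0 : ¬ i = 0 := by omega
      have h1 : ¬ i = 1 := by omega
      have h2 : ¬ i = 2 := by omega
      simp [h0, h1, h2, hi]
  rw [he]
  cases hb : (s % 2 == 0 && decide (i ≤ 2)) <;> simp

-- ===== VERDICT (by name: the statement is the Claim_ definition above) =====
theorem move_two_balls_spec : Claim_equal_move_two_balls := by
  intro arr _
  unfold Spec_move_two_balls
  by_cases hnil : arr = []
  · rw [move_two_balls, move_two_balls_alt, if_pos hnil, if_pos hnil]
  · rw [move_two_balls, move_two_balls_alt, if_neg hnil, if_neg hnil]
    have hfoldA := outer_fold arr 0 (0, 0) (by omega)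
    simp only [Nat.cast_zero, List.drop_zero] at hfoldA
    rw [hfoldA]
    obtain ⟨hc, _, _⟩ := sortCount_spec arr
    rw [hc]
    have hlen : 1 ≤ arr.length := by
      cases arr with
      | nil => exact absurd rfl hnil
      | cons a t => simp
    have hfoldB := b_fold arr 1 0 hlen
    simp only [Nat.cast_one] at hfoldB
    rw [hfoldB]
    obtain ⟨a, rest, rfl⟩ : ∃ a rest, arr = a :: rest := by
      cases arr with
      | nil => exact absurd rfl hnil
      | cons a t => exact ⟨a, t, rfl⟩
    have hdrop1 : (a :: rest).drop 1 = rest := rfl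
    rw [hdrop1]
    rw [show (0 : Int) + inv2 (a :: rest) = inv2 (a :: rest) by ring,
        show (0 : Int) + sumSuf (PySem.List.pyGetD (a :: rest) 0 0) (a :: rest)
           = sumSuf (PySem.List.pyGetD (a :: rest) 0 0) (a :: rest) by ring,
        show (0 : Int) + wsum (PySem.List.pyGetD (a :: rest) 0 0) 1 rest
           = wsum (PySem.List.pyGetD (a :: rest) 0 0) 1 rest by ring]
    rw [sumSuf_eq_wsum1]
    exact bool_final (inv2 (a :: rest)) _ (inv2_nonneg _)
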